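-- pv_equiv track=rewrite | github.com/EugeneKornev/algo_mini_37 | main.py | count_top_sort
-- ===== SOURCE A (Python) =====
-- def count_top_sort(edges):
--     N = len(edges) + 1
--     parents = [[] for _ in range(N)]
--
--     for u, v in edges:
--         parents[v].append(u)
--
--     top_sorts = [0] * (1 << N)
--     top_sorts[0] = 1
--
--     for mask in range(1 << N):
--         for v in range(N):
--             if mask & 1 << v:
--                 continue
--             if all(mask & 1 << p for p in parents[v]):
--                 top_sorts[mask | 1 << v] += top_sorts[mask]
--
--     return top_sorts[-1]
-- ===== SOURCE B (Python) =====
-- def count_top_sort(edges):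
--     n = len(edges) + 1
--     pmask = [0] * n
--     for u, v in edges:
--         pmask[v] |= 1 << u
--     memo = {0: 1}
--
--     def f(m):
--         if m in memo:
--             return memo[m]
--         total = 0
--         for v in range(n):
--             b = 1 << v
--             if m & b and pmask[v] & (m ^ b) == pmask[v]:
--                 total += f(m ^ b)
--         memo[m] = total
--         return total
--
--     return f((1 << n) - 1)
-- ===== Notes on version B (the rewrite author's own statement) =====
-- stated objective: alternative
-- what changed: B replaces A's bottom-up sweep that fills the full 2^N table (scanning each vertex's parent list at every mask) by top-down memoized recursion from the complete vertex set with precomputed parent bitmasks: f(m) sums f(m\{v}) over vertices v whose parents all lie in m\{v}, so only masks reachable by peeling ready vertices are ever computed and the readiness test is one O(1) bitmask comparison.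
-- outside the precondition, e.g. on count_top_sort([(5, -3), (0, -2), (-3, 1)]): A returns 0, B raises ValueError
import Mathlib
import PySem

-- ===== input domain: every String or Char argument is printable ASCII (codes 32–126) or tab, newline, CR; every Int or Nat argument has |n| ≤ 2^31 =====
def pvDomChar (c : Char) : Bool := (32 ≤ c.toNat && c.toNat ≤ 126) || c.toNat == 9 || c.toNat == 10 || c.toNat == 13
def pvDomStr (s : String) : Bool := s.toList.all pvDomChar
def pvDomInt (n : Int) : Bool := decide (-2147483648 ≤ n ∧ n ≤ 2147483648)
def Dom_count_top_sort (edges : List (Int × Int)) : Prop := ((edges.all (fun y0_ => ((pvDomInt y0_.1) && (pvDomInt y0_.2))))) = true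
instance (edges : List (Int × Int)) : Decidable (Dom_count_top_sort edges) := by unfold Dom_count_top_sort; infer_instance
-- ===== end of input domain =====

-- B replaces A's bottom-up iteration over the full 2^N table (a per-vertex parent-list scan at
-- every mask) by top-down memoized recursion from the full vertex set with precomputed parent
-- bitmasks: only masks actually reachable by removing ready vertices are ever computed.

-- Python list index for parents[v] / pmask[v]: one negative wraparound (exact for -N ≤ v < N,
-- the range Pre_ admits); both Pythons index the same way.
def pyIdxN (N : Nat) (v : Int) : Nat := (if v < 0 then v + N else v).toNat

-- ===== PORT A =====
-- `mask & 1 << p` is ported as `mask &&& (1 <<< p.toNat)` — exact for p ≥ 0 (Pre_ excludes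
-- negative sources, on which Python raises ValueError or short-circuits past them).
def count_top_sort (edges : List (Int × Int)) : Int :=
  let N : Nat := edges.length + 1
  let parents : List (List Int) :=
    edges.foldl (fun ps uv =>
      ps.set (pyIdxN N uv.2) (ps.getD (pyIdxN N uv.2) [] ++ [uv.1]))
      (List.replicate N [])
  let ts : List Int :=
    (List.range (1 <<< N)).foldl (fun ts mask =>
      (List.range N).foldl (fun ts v =>
        if mask &&& (1 <<< v) != 0 then ts
        else if (parents.getD v []).all (fun p => mask &&& (1 <<< p.toNat) != 0) then
          ts.set (mask ||| (1 <<< v)) (ts.getD (mask ||| (1 <<< v)) 0 + ts.getD mask 0)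
        else ts) ts)
      ((List.replicate (1 <<< N) 0).set 0 1)
  ts.getD ((1 <<< N) - 1) 0

-- ===== PORT B =====
-- Source B's recursive f with its memo dict; the extra fuel argument (enough for the deepest
-- recursion, masks strictly decrease) only makes the recursion total, it never fires on the
-- actual call.
def pvFB (pm : List Nat) (n : Nat) : Nat → Nat → PySem.Dict Nat Int → Int × PySem.Dict Nat Int
  | 0, _, memo => (0, memo)
  | fuel + 1, m, memo =>
    match memo.get? m with
    | some c => (c, memo)
    | none =>
      let r := (List.range n).foldl (fun (st : Int × PySem.Dict Nat Int) v =>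
        if (m &&& (1 <<< v) != 0) && (pm.getD v 0 &&& (m ^^^ (1 <<< v)) == pm.getD v 0) then
          (st.1 + (pvFB pm n fuel (m ^^^ (1 <<< v)) st.2).1, (pvFB pm n fuel (m ^^^ (1 <<< v)) st.2).2)
        else st) (0, memo)
      (r.1, r.2.insert m r.1)

def count_top_sort_alt (edges : List (Int × Int)) : Int :=
  let n : Nat := edges.length + 1
  let pmask : List Nat :=
    edges.foldl (fun ps uv =>
      ps.set (pyIdxN n uv.2) (ps.getD (pyIdxN n uv.2) 0 ||| (1 <<< uv.1.toNat)))
      (List.replicate n 0)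
  (pvFB pmask n (1 <<< n) ((1 <<< n) - 1) (PySem.Dict.empty.insert 0 1)).1

-- ===== PRECONDITION & SPEC =====
-- Pre_ excludes exactly the inputs where a Python raises: an edge target v outside [-N, N)
-- makes A raise IndexError; a negative edge source u makes A raise ValueError (1 << u) unless
-- an always-false earlier parent check short-circuits past it (then A accidentally returns 0),
-- while B always raises ValueError there, building the bitmask.
def Pre_count_top_sort (edges : List (Int × Int)) : Prop :=
  ∀ uv ∈ edges, 0 ≤ uv.1 ∧ -((edges.length : Int) + 1) ≤ uv.2 ∧ uv.2 < (edges.length : Int) + 1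
instance (edges : List (Int × Int)) : Decidable (Pre_count_top_sort edges) := by
  unfold Pre_count_top_sort; infer_instance

def pvWitness_count_top_sort : (List (Int × Int)) := [(0, 1)]

def Spec_count_top_sort (edges : List (Int × Int)) (out : Int) : Prop := out = count_top_sort_alt edges
instance (edges : List (Int × Int)) (out : Int) : Decidable (Spec_count_top_sort edges out) := by unfold Spec_count_top_sort; infer_instance

-- ===== CLAIM (what is proved, stated in full; the proofs are below) =====
def Claim_equal_count_top_sort : Prop := ∀ (edges : List (Int × Int)), Dom_count_top_sort edges → Pre_count_top_sort edges → Spec_count_top_sort edges (count_top_sort edges)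

-- ===== LEMMAS AND PROOFS =====

theorem pvb_one_shift (v : Nat) : (1 <<< v) = 2 ^ v := Nat.one_shiftLeft v

theorem pvb_and_pow_ne (m v : Nat) : (m &&& (1 <<< v) != 0) = m.testBit v := by
  rw [pvb_one_shift, Nat.and_two_pow]
  cases h : m.testBit v <;> simp [h, Nat.pos_iff_ne_zero, Nat.pow_pos]

theorem pvb_subset_iff (a m : Nat) :
    (a &&& m = a) ↔ ∀ j, a.testBit j = true → m.testBit j = true := by
  constructor
  · intro h j hj
    have := congrArg (fun x => x.testBit j) h
    simp only [Nat.testBit_and, hj, Bool.true_and] at this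
    exact this
  · intro h
    apply Nat.eq_of_testBit_eq
    intro j
    simp only [Nat.testBit_and]
    cases hj : a.testBit j
    · simp
    · simp [h j hj]

theorem pvb_xor_lt (m v : Nat) (h : m.testBit v = true) : m ^^^ (1 <<< v) < m := by
  apply Nat.lt_of_testBit v
  · simp [Nat.testBit_xor, pvb_one_shift, h, Nat.testBit_two_pow_self]
  · exact h
  · intro j hj
    simp [Nat.testBit_xor, pvb_one_shift, Nat.testBit_two_pow_of_ne (Nat.ne_of_lt hj)]

theorem pvb_xor_bit (m v : Nat) (h : m.testBit v = true) :
    ((m ^^^ (1 <<< v)).testBit v = false) ∧ (m ^^^ (1 <<< v)) ||| (1 <<< v) = m := by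
  constructor
  · simp [Nat.testBit_xor, pvb_one_shift, h, Nat.testBit_two_pow_self]
  · apply Nat.eq_of_testBit_eq
    intro j
    by_cases hj : j = v
    · subst hj
      simp [Nat.testBit_or, pvb_one_shift, Nat.testBit_two_pow_self, h]
    · simp [Nat.testBit_or, Nat.testBit_xor, pvb_one_shift,
        Nat.testBit_two_pow_of_ne (Ne.symm hj)]

theorem pvb_push_iff (m m' v : Nat) (h : m.testBit v = true) :
    (m'.testBit v = false ∧ m = m' ||| (1 <<< v)) ↔ m' = m ^^^ (1 <<< v) := by
  constructor
  · rintro ⟨hb, rfl⟩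
    apply Nat.eq_of_testBit_eq
    intro j
    by_cases hj : j = v
    · subst hj
      simp [Nat.testBit_xor, Nat.testBit_or, pvb_one_shift, Nat.testBit_two_pow_self, hb]
    · simp [Nat.testBit_xor, Nat.testBit_or, pvb_one_shift,
        Nat.testBit_two_pow_of_ne (Ne.symm hj)]
  · rintro rfl
    exact ⟨(pvb_xor_bit m v h).1, ((pvb_xor_bit m v h).2).symm⟩

theorem pvb_or_ne (m' v : Nat) (h : m'.testBit v = false) : m' ≠ m' ||| (1 <<< v) := by
  intro he
  have := congrArg (fun x => x.testBit v) he
  simp [Nat.testBit_or, pvb_one_shift, Nat.testBit_two_pow_self, h] at this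

theorem pvb_or_lt (n mask v : Nat) (hm : mask < 2 ^ n) (hv : v < n) :
    mask ||| (1 <<< v) < 2 ^ n := by
  rw [pvb_one_shift]
  exact Nat.or_lt_two_pow hm (Nat.pow_lt_pow_right (by norm_num) hv)

theorem pvl_getD_map_range {α : Type} (S i : Nat) (f : Nat → α) (d : α) :
    (((List.range S).map f).getD i d) = if i < S then f i else d := by
  simp only [List.getD, List.getElem?_map]
  by_cases h : i < S
  · simp [List.getElem?_range h, h]
  · rw [List.getElem?_eq_none (by simpa using Nat.le_of_not_lt h)]
    simp [h]

theorem pvl_set_map_range {α : Type} (S i : Nat) (hi : i < S) (f : Nat → α) (x : α) :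
    ((List.range S).map f).set i x
      = (List.range S).map (fun j => if j = i then x else f j) := by
  apply List.ext_getElem
  · simp
  · intro j h1 h2
    simp only [List.getElem_set, List.getElem_map, List.getElem_range]
    by_cases hj : j = i
    · simp [hj]
    · rw [if_neg (fun h => hj h.symm), if_neg hj]

theorem pvl_foldl_add_if {α : Type} (l : List α) (c : α → Bool) (g : α → Int) (a : Int) :
    l.foldl (fun t v => if c v then t + g v else t) a
      = a + (l.map (fun v => if c v then g v else 0)).sum := by
  induction l generalizing a with
  | nil => simp
  | cons x xs ih =>
    simp only [List.foldl_cons, List.map_cons, List.sum_cons, ih]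
    by_cases h : c x <;> simp [h] <;> ring

theorem pvl_sum_range (n : Nat) (f : Nat → Int) :
    ((List.range n).map f).sum = ∑ v ∈ Finset.range n, f v := by
  induction n with
  | zero => simp
  | succ k ih => simp [List.range_succ, Finset.sum_range_succ, ih]

def mOf (L : List Int) : Nat := L.foldl (fun a p => a ||| (1 <<< p.toNat)) 0

theorem pv_mOf_foldl_testBit (L : List Int) (a : Nat) (j : Nat) :
    (L.foldl (fun a p => a ||| (1 <<< p.toNat)) a).testBit j
      = (a.testBit j || L.any (fun p => p.toNat == j)) := by
  induction L generalizing a with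
  | nil => simp
  | cons x xs ih =>
    simp only [List.foldl_cons, List.any_cons]
    rw [ih]
    simp only [Nat.testBit_or, pvb_one_shift, Nat.testBit_two_pow]
    rw [Bool.eq_iff_iff]
    simp [beq_iff_eq, or_assoc]

theorem pv_mOf_testBit (L : List Int) (j : Nat) :
    (mOf L).testBit j = L.any (fun p => p.toNat == j) := by
  simpa using pv_mOf_foldl_testBit L 0 j

def rdy (pm : List Nat) (v m : Nat) : Bool := pm.getD v 0 &&& m == pm.getD v 0

theorem pv_ready_eq (L : List Int) (m : Nat) :
    (L.all (fun p => m &&& (1 <<< p.toNat) != 0)) = (mOf L &&& m == mOf L) := by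
  rw [Bool.eq_iff_iff]
  simp only [List.all_eq_true, pvb_and_pow_ne, beq_iff_eq]
  rw [pvb_subset_iff]
  constructor
  · intro h j hj
    rw [pv_mOf_testBit] at hj
    simp only [List.any_eq_true, beq_iff_eq] at hj
    obtain ⟨p, hp, rfl⟩ := hj
    exact h p hp
  · intro h p hp
    apply h
    rw [pv_mOf_testBit]
    simp only [List.any_eq_true, beq_iff_eq]
    exact ⟨p, hp, rfl⟩

theorem pv_mOf_append (L : List Int) (u : Int) :
    mOf (L ++ [u]) = mOf L ||| (1 <<< u.toNat) := by
  simp [mOf, List.foldl_append]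

theorem pv_getD_set_eq {α : Type} (l : List α) (i : Nat) (x d : α) (h : i < l.length) :
    (l.set i x).getD i d = x := by
  simp [List.getD_eq_getElem?_getD, List.getElem?_set, h]

theorem pv_getD_set_ne {α : Type} (l : List α) (i j : Nat) (x : α) (d : α) (h : i ≠ j) :
    (l.set i x).getD j d = l.getD j d := by
  simp [List.getD_eq_getElem?_getD, List.getElem?_set, h]

theorem pv_build (n : Nat) (edges : List (Int × Int)) (ps : List Nat) (qs : List (List Int))
    (hlen : ps.length = qs.length) (hv : ∀ v, ps.getD v 0 = mOf (qs.getD v [])) :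
    ∀ v, (edges.foldl (fun ps uv =>
            ps.set (pyIdxN n uv.2) (ps.getD (pyIdxN n uv.2) 0 ||| (1 <<< uv.1.toNat))) ps).getD v 0
      = mOf ((edges.foldl (fun qs uv =>
            qs.set (pyIdxN n uv.2) (qs.getD (pyIdxN n uv.2) [] ++ [uv.1])) qs).getD v []) := by
  induction edges generalizing ps qs with
  | nil => exact hv
  | cons e es ih =>
    simp only [List.foldl_cons]
    apply ih
    · simp [hlen]
    · intro v
      by_cases hveq : v = pyIdxN n e.2
      · rw [hveq]
        by_cases hlt : pyIdxN n e.2 < ps.length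
        · rw [pv_getD_set_eq _ _ _ _ hlt, pv_getD_set_eq _ _ _ _ (by omega),
            pv_mOf_append, hv _]
        · rw [List.set_eq_of_length_le (by omega), List.set_eq_of_length_le (by omega)]
          exact hv _
      · rw [pv_getD_set_ne _ _ _ _ _ (fun h => hveq h.symm),
          pv_getD_set_ne _ _ _ _ _ (fun h => hveq h.symm)]
        exact hv v

def bval (pm : List Nat) (n : Nat) (dp : List Int) (m : Nat) : Int :=
  (List.range n).foldl (fun total v =>
    if (m &&& (1 <<< v) != 0) && rdy pm v (m ^^^ (1 <<< v)) then
      total + dp.getD (m ^^^ (1 <<< v)) 0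
    else total) 0

def dpB (pm : List Nat) (n : Nat) (K : Nat) : List Int :=
  (List.range' 1 K).foldl (fun dp m => dp ++ [bval pm n dp m]) [1]

def gval (pm : List Nat) (n : Nat) (m : Nat) : Int := (dpB pm n m).getD m 0

theorem pv_dpB_succ (pm : List Nat) (n K : Nat) :
    dpB pm n (K + 1) = dpB pm n K ++ [bval pm n (dpB pm n K) (K + 1)] := by
  simp [dpB, List.range'_concat, List.foldl_append, Nat.add_comm 1 K]

theorem pv_dpB_len (pm : List Nat) (n K : Nat) : (dpB pm n K).length = K + 1 := by
  induction K with
  | zero => rfl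
  | succ k ih => simp [pv_dpB_succ, ih]

theorem pv_dpB_getD (pm : List Nat) (n K m : Nat) (h : m ≤ K) :
    (dpB pm n K).getD m 0 = gval pm n m := by
  induction K with
  | zero => interval_cases m; rfl
  | succ k ih =>
    rcases Nat.lt_or_ge m (k + 1) with hm | hm
    · rw [pv_dpB_succ, List.getD_eq_getElem?_getD, List.getElem?_append_left
        (by rw [pv_dpB_len]; omega)]
      rw [← List.getD_eq_getElem?_getD]
      exact ih (by omega)
    · have : m = k + 1 := by omega
      subst this
      rfl

theorem pv_gval_rec (pm : List Nat) (n m : Nat) (h : 1 ≤ m) :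
    gval pm n m = ∑ v ∈ Finset.range n,
      if (m.testBit v && rdy pm v (m ^^^ (1 <<< v))) then gval pm n (m ^^^ (1 <<< v)) else 0 := by
  obtain ⟨k, rfl⟩ : ∃ k, m = k + 1 := ⟨m - 1, by omega⟩
  have h1 : gval pm n (k + 1) = bval pm n (dpB pm n k) (k + 1) := by
    show (dpB pm n (k+1)).getD (k+1) 0 = _
    rw [pv_dpB_succ, List.getD_eq_getElem?_getD, List.getElem?_append_right
      (by rw [pv_dpB_len]), pv_dpB_len]
    simp
  rw [h1, bval, pvl_foldl_add_if, pvl_sum_range, zero_add]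
  apply Finset.sum_congr rfl
  intro v _
  rw [pvb_and_pow_ne]
  by_cases ht : (k+1).testBit v
  · simp only [ht, Bool.true_and]
    by_cases hr : rdy pm v ((k+1) ^^^ (1 <<< v))
    · rw [hr]
      simp only [if_true]
      rw [pv_dpB_getD pm n k _ (by have := pvb_xor_lt (k+1) v ht; omega)]
    · simp [hr]
  · simp [ht]

def pushc (pm : List Nat) (v m' i : Nat) : Bool :=
  !m'.testBit v && rdy pm v m' && (i == m' ||| (1 <<< v))

def contrib (pm : List Nat) (n : Nat) (m' i : Nat) : Int :=
  ∑ v ∈ Finset.range n, if pushc pm v m' i then gval pm n m' else 0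

def pval (pm : List Nat) (n : Nat) (k i : Nat) : Int :=
  (if i = 0 then (1:Int) else 0) + ∑ m' ∈ Finset.range k, contrib pm n m' i

theorem pv_contrib_self (pm : List Nat) (n m' : Nat) : contrib pm n m' m' = 0 := by
  unfold contrib
  apply Finset.sum_eq_zero
  intro v _
  by_cases ht : m'.testBit v = true
  · simp [pushc, ht]
  · have hne := pvb_or_ne m' v (by simpa using ht)
    simp [pushc, beq_iff_eq, hne]

theorem pv_sum_push_zero (pm : List Nat) (n m v : Nat)
    (hall : ∀ m', m' < m → pushc pm v m' m = false) :
    (∑ m' ∈ Finset.range m, if pushc pm v m' m then gval pm n m' else 0) = 0 := by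
  apply Finset.sum_eq_zero
  intro m' hm'
  rw [hall m' (Finset.mem_range.1 hm')]
  simp

theorem pv_pushc_parts (pm : List Nat) (v m' m : Nat) (h : pushc pm v m' m = true) :
    m'.testBit v = false ∧ rdy pm v m' = true ∧ m = m' ||| (1 <<< v) := by
  simp only [pushc, Bool.and_eq_true, Bool.not_eq_true', beq_iff_eq] at h
  exact ⟨h.1.1, h.1.2, h.2⟩

theorem pv_inner_sum (pm : List Nat) (n m v : Nat) :
    (∑ m' ∈ Finset.range m, if pushc pm v m' m then gval pm n m' else 0)
      = (if (m.testBit v && rdy pm v (m ^^^ (1 <<< v))) then gval pm n (m ^^^ (1 <<< v)) else 0) := by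
  by_cases ht : m.testBit v = true
  · by_cases hr : rdy pm v (m ^^^ (1 <<< v)) = true
    · have hpc : ∀ m', pushc pm v m' m = (m' == m ^^^ (1 <<< v)) := by
        intro m'
        rw [Bool.eq_iff_iff]
        constructor
        · intro h
          obtain ⟨hb, _, hm⟩ := pv_pushc_parts pm v m' m h
          simp only [beq_iff_eq]
          exact (pvb_push_iff m m' v ht).1 ⟨hb, hm⟩
        · intro h
          rw [beq_iff_eq] at h
          subst h
          simp only [pushc, Bool.and_eq_true, Bool.not_eq_true', beq_iff_eq]
          exact ⟨⟨(pvb_xor_bit m v ht).1, hr⟩, ((pvb_xor_bit m v ht).2).symm⟩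
      simp only [hpc, beq_iff_eq]
      rw [Finset.sum_ite_eq' (Finset.range m) (m ^^^ (1 <<< v)) (fun m' => gval pm n m')]
      rw [if_pos (Finset.mem_range.2 (pvb_xor_lt m v ht)), ht, hr]
      simp
    · rw [pv_sum_push_zero]
      · rw [ht]
        cases hx : rdy pm v (m ^^^ (1 <<< v))
        · simp
        · exact absurd hx hr
      · intro m' _
        cases hx : pushc pm v m' m
        · rfl
        · obtain ⟨hb, hrm, hm⟩ := pv_pushc_parts pm v m' m hx
          have : m' = m ^^^ (1 <<< v) := (pvb_push_iff m m' v ht).1 ⟨hb, hm⟩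
          subst this
          exact absurd hrm hr
  · rw [pv_sum_push_zero]
    · cases hx : m.testBit v
      · simp
      · exact absurd hx ht
    · intro m' _
      cases hx : pushc pm v m' m
      · rfl
      · obtain ⟨hb, _, hm⟩ := pv_pushc_parts pm v m' m hx
        have := congrArg (fun x => x.testBit v) hm
        simp only [Nat.testBit_or, pvb_one_shift, Nat.testBit_two_pow_self, hb,
          Bool.or_true] at this
        exact absurd this ht

theorem pv_key (pm : List Nat) (n m : Nat) : pval pm n m m = gval pm n m := by
  cases m with
  | zero => simp [pval, gval, dpB, contrib]
  | succ k =>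
    unfold pval contrib
    rw [if_neg (Nat.succ_ne_zero k), zero_add, Finset.sum_comm]
    rw [Finset.sum_congr rfl (fun v _ => pv_inner_sum pm n (k + 1) v)]
    exact (pv_gval_rec pm n (k + 1) (by omega)).symm

def Astep (pm : List Nat) (n : Nat) (ts : List Int) (mask : Nat) : List Int :=
  (List.range n).foldl (fun ts v =>
    if mask &&& (1 <<< v) != 0 then ts
    else if rdy pm v mask then
      ts.set (mask ||| (1 <<< v)) (ts.getD (mask ||| (1 <<< v)) 0 + ts.getD mask 0)
    else ts) ts

theorem pv_pushc_self (pm : List Nat) (v m' : Nat) : pushc pm v m' m' = false := by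
  by_cases ht : m'.testBit v = true
  · simp [pushc, ht]
  · have hne := pvb_or_ne m' v (by simpa using ht)
    simp [pushc, beq_iff_eq, hne]

def pvQ (pm : List Nat) (n mask j i : Nat) : Int :=
  pval pm n mask i + ∑ v ∈ Finset.range j, (if pushc pm v mask i then gval pm n mask else 0)

theorem pvQ_zero (pm : List Nat) (n mask i : Nat) : pvQ pm n mask 0 i = pval pm n mask i := by
  simp [pvQ]

theorem pvQ_self (pm : List Nat) (n mask j : Nat) : pvQ pm n mask j mask = gval pm n mask := by
  unfold pvQ
  rw [Finset.sum_eq_zero (fun v _ => by rw [pv_pushc_self]; simp), add_zero, pv_key]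

theorem pvQ_succ (pm : List Nat) (n mask j i : Nat) :
    pvQ pm n mask (j + 1) i
      = pvQ pm n mask j i + (if pushc pm j mask i then gval pm n mask else 0) := by
  unfold pvQ
  rw [Finset.sum_range_succ]
  ring

theorem pv_Astep_inner (pm : List Nat) (n mask : Nat) (hm : mask < 2 ^ n) (j : Nat) (hj : j ≤ n) :
    (List.range j).foldl (fun ts v =>
      if mask &&& (1 <<< v) != 0 then ts
      else if rdy pm v mask then
        ts.set (mask ||| (1 <<< v)) (ts.getD (mask ||| (1 <<< v)) 0 + ts.getD mask 0)
      else ts) ((List.range (2 ^ n)).map (pval pm n mask))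
    = (List.range (2 ^ n)).map (pvQ pm n mask j) := by
  induction j with
  | zero =>
    simp only [List.range_zero, List.foldl_nil]
    exact List.map_congr_left (fun i _ => (pvQ_zero pm n mask i).symm)
  | succ k ih =>
    rw [List.range_succ, List.foldl_append, ih (by omega), List.foldl_cons, List.foldl_nil]
    have hkn : k < n := by omega
    simp only [pvb_and_pow_ne]
    by_cases hbit : mask.testBit k = true
    · rw [if_pos hbit]
      apply List.map_congr_left
      intro i _
      rw [pvQ_succ]
      have hp : pushc pm k mask i = false := by simp [pushc, hbit]
      rw [hp]
      simp
    · have hbit' : mask.testBit k = false := by revert hbit; cases mask.testBit k <;> simp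
      rw [if_neg hbit]
      by_cases hrdy : rdy pm k mask = true
      · rw [if_pos hrdy]
        have hidx : mask ||| (1 <<< k) < 2 ^ n := pvb_or_lt n mask k hm hkn
        rw [pvl_getD_map_range, pvl_getD_map_range, if_pos hidx, if_pos hm, pvQ_self,
          pvl_set_map_range _ _ hidx]
        apply List.map_congr_left
        intro i _
        rw [pvQ_succ]
        have hpc : pushc pm k mask i = (i == mask ||| (1 <<< k)) := by
          simp [pushc, hbit', hrdy]
        rw [hpc]
        by_cases hi : i = mask ||| (1 <<< k)
        · rw [if_pos hi, if_pos (by simp [hi]), hi]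
        · rw [if_neg hi, if_neg (by simp [hi])]
          simp
      · rw [if_neg hrdy]
        apply List.map_congr_left
        intro i _
        rw [pvQ_succ]
        have hp : pushc pm k mask i = false := by
          have hr' : rdy pm k mask = false := by revert hrdy; cases rdy pm k mask <;> simp
          simp [pushc, hr']
        rw [hp]
        simp

theorem pv_Astep_map (pm : List Nat) (n mask : Nat) (hm : mask < 2 ^ n) :
    Astep pm n ((List.range (2 ^ n)).map (pval pm n mask)) mask
      = (List.range (2 ^ n)).map (pval pm n (mask + 1)) := by
  unfold Astep
  rw [pv_Astep_inner pm n mask hm n (le_refl n)]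
  apply List.map_congr_left
  intro i _
  unfold pvQ pval
  rw [Finset.sum_range_succ]
  unfold contrib
  ring

theorem pv_ts0 : ∀ (pm : List Nat) (n : Nat),
    (List.replicate (2 ^ n) (0:Int)).set 0 1 = (List.range (2 ^ n)).map (pval pm n 0) := by
  intro pm n
  apply List.ext_getElem
  · simp
  · intro i h1 h2
    simp only [List.getElem_set, List.getElem_replicate, List.getElem_map, List.getElem_range]
    unfold pval
    by_cases hi : i = 0
    · simp [hi]
    · simp [Ne.symm hi, hi]

theorem pv_Arun (pm : List Nat) (n K : Nat) (hK : K ≤ 2 ^ n) :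
    (List.range K).foldl (Astep pm n) ((List.replicate (2 ^ n) (0:Int)).set 0 1)
      = (List.range (2 ^ n)).map (pval pm n K) := by
  induction K with
  | zero => simpa using pv_ts0 pm n
  | succ k ih =>
    rw [List.range_succ, List.foldl_append, ih (by omega), List.foldl_cons, List.foldl_nil,
      pv_Astep_map pm n k (by omega)]

theorem pv_pval_succ (pm : List Nat) (n k i : Nat) :
    pval pm n (k + 1) i = pval pm n k i + contrib pm n k i := by
  unfold pval
  rw [Finset.sum_range_succ]
  ring

theorem pv_last (pm : List Nat) (n : Nat) :
    pval pm n (2 ^ n) (2 ^ n - 1) = gval pm n (2 ^ n - 1) := by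
  obtain ⟨K, hK⟩ : ∃ K, 2 ^ n = K + 1 := ⟨2 ^ n - 1, by have := Nat.one_le_two_pow (n := n); omega⟩
  rw [hK, Nat.add_sub_cancel, pv_pval_succ, pv_contrib_self, add_zero, pv_key]

def pmOf (n : Nat) (edges : List (Int × Int)) : List Nat :=
  edges.foldl (fun ps uv =>
    ps.set (pyIdxN n uv.2) (ps.getD (pyIdxN n uv.2) 0 ||| (1 <<< uv.1.toNat)))
    (List.replicate n 0)

def parOf (n : Nat) (edges : List (Int × Int)) : List (List Int) :=
  edges.foldl (fun ps uv =>
    ps.set (pyIdxN n uv.2) (ps.getD (pyIdxN n uv.2) [] ++ [uv.1]))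
    (List.replicate n [])

theorem pv_pm_par (n : Nat) (edges : List (Int × Int)) (v : Nat) :
    (pmOf n edges).getD v 0 = mOf ((parOf n edges).getD v []) := by
  apply pv_build
  · simp
  · intro v
    simp [mOf, List.getD_eq_getElem?_getD, List.getElem?_replicate]
    by_cases h : v < n <;> simp [h]

theorem pv_A_eq_gval (edges : List (Int × Int)) :
    count_top_sort edges
      = gval (pmOf (edges.length + 1) edges) (edges.length + 1)
          (2 ^ (edges.length + 1) - 1) := by
  have hstep : (fun (ts : List Int) (mask : Nat) =>
      (List.range (edges.length + 1)).foldl (fun ts v =>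
        if mask &&& (1 <<< v) != 0 then ts
        else if ((parOf (edges.length + 1) edges).getD v []).all
            (fun p => mask &&& (1 <<< p.toNat) != 0) then
          ts.set (mask ||| (1 <<< v)) (ts.getD (mask ||| (1 <<< v)) 0 + ts.getD mask 0)
        else ts) ts)
      = Astep (pmOf (edges.length + 1) edges) (edges.length + 1) := by
    funext ts mask
    unfold Astep
    refine congrArg (fun f => List.foldl f ts (List.range (edges.length + 1))) ?_
    funext ts' v
    rw [pv_ready_eq, ← pv_pm_par]
    rfl
  show ((List.range (1 <<< (edges.length + 1))).foldl
      (fun (ts : List Int) mask => (List.range (edges.length + 1)).foldl (fun ts v =>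
        if mask &&& (1 <<< v) != 0 then ts
        else if ((parOf (edges.length + 1) edges).getD v []).all
            (fun p => mask &&& (1 <<< p.toNat) != 0) then
          ts.set (mask ||| (1 <<< v)) (ts.getD (mask ||| (1 <<< v)) 0 + ts.getD mask 0)
        else ts) ts)
      ((List.replicate (1 <<< (edges.length + 1)) 0).set 0 1)).getD
      ((1 <<< (edges.length + 1)) - 1) 0 = _
  rw [hstep, pvb_one_shift, pv_Arun _ _ _ (le_refl _), pvl_getD_map_range,
    if_pos (by have := Nat.one_le_two_pow (n := edges.length + 1); omega), pv_last]

-- ===== B-side: the memoized recursion computes gval =====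

def pvInv (pm : List Nat) (n : Nat) (memo : PySem.Dict Nat Int) : Prop :=
  (∃ c, memo.get? 0 = some c) ∧ ∀ k c, memo.get? k = some c → c = gval pm n k

theorem pv_gval_zero (pm : List Nat) (n : Nat) : gval pm n 0 = 1 := rfl

theorem pvFB_loop (pm : List Nat) (n fuel m : Nat) (hm : m ≤ fuel)
    (hrec : ∀ m' memo, m' < fuel → pvInv pm n memo →
      (pvFB pm n fuel m' memo).1 = gval pm n m' ∧ pvInv pm n (pvFB pm n fuel m' memo).2) :
    ∀ (l : List Nat) (t : Int) (memo : PySem.Dict Nat Int), pvInv pm n memo →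
      (l.foldl (fun (st : Int × PySem.Dict Nat Int) v =>
        if (m &&& (1 <<< v) != 0) && (pm.getD v 0 &&& (m ^^^ (1 <<< v)) == pm.getD v 0) then
          (st.1 + (pvFB pm n fuel (m ^^^ (1 <<< v)) st.2).1,
            (pvFB pm n fuel (m ^^^ (1 <<< v)) st.2).2)
        else st) (t, memo)).1
      = t + (l.map (fun v => if (m.testBit v && rdy pm v (m ^^^ (1 <<< v)))
            then gval pm n (m ^^^ (1 <<< v)) else 0)).sum
      ∧ pvInv pm n (l.foldl (fun (st : Int × PySem.Dict Nat Int) v =>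
        if (m &&& (1 <<< v) != 0) && (pm.getD v 0 &&& (m ^^^ (1 <<< v)) == pm.getD v 0) then
          (st.1 + (pvFB pm n fuel (m ^^^ (1 <<< v)) st.2).1,
            (pvFB pm n fuel (m ^^^ (1 <<< v)) st.2).2)
        else st) (t, memo)).2 := by
  intro l
  induction l with
  | nil => intro t memo hInv; exact ⟨by simp, hInv⟩
  | cons v vs ih =>
    intro t memo hInv
    simp only [List.foldl_cons, List.map_cons, List.sum_cons]
    have hcond : ((m &&& (1 <<< v) != 0) && (pm.getD v 0 &&& (m ^^^ (1 <<< v)) == pm.getD v 0))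
        = (m.testBit v && rdy pm v (m ^^^ (1 <<< v))) := by
      rw [pvb_and_pow_ne]; rfl
    by_cases hc : (m.testBit v && rdy pm v (m ^^^ (1 <<< v))) = true
    · rw [hcond, if_pos hc]
      have htb : m.testBit v = true := (Bool.and_eq_true _ _ |>.mp hc).1
      have hlt : m ^^^ (1 <<< v) < fuel := lt_of_lt_of_le (pvb_xor_lt m v htb) hm
      obtain ⟨hval, hInv'⟩ := hrec (m ^^^ (1 <<< v)) memo hlt hInv
      obtain ⟨h1, h2⟩ := ih (t + (pvFB pm n fuel (m ^^^ (1 <<< v)) memo).1)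
        ((pvFB pm n fuel (m ^^^ (1 <<< v)) memo).2) hInv'
      refine ⟨?_, h2⟩
      rw [h1, hval, if_pos hc]
      ring
    · rw [hcond, if_neg hc]
      obtain ⟨h1, h2⟩ := ih t memo hInv
      refine ⟨?_, h2⟩
      rw [h1]
      have : (if (m.testBit v && rdy pm v (m ^^^ (1 <<< v)))
          then gval pm n (m ^^^ (1 <<< v)) else 0) = 0 := by
        rw [if_neg hc]
      rw [this]
      ring

theorem pvFB_spec (pm : List Nat) (n : Nat) :
    ∀ (fuel m : Nat) (memo : PySem.Dict Nat Int), m < fuel → pvInv pm n memo →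
      (pvFB pm n fuel m memo).1 = gval pm n m ∧ pvInv pm n (pvFB pm n fuel m memo).2 := by
  intro fuel
  induction fuel with
  | zero => intro m memo hm; omega
  | succ fuel ih =>
    intro m memo hm hInv
    cases hg : memo.get? m with
    | some c =>
      have heqv : (pvFB pm n (fuel + 1) m memo).1 = c := by rw [pvFB, hg]
      have heqm : (pvFB pm n (fuel + 1) m memo).2 = memo := by rw [pvFB, hg]
      rw [heqv, heqm]
      exact ⟨hInv.2 m c hg, hInv⟩
    | none =>
      have hm0 : m ≠ 0 := by
        intro h0
        obtain ⟨c, hc⟩ := hInv.1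
        rw [h0, hc] at hg
        cases hg
      set F : Int × PySem.Dict Nat Int :=
        (List.range n).foldl (fun (st : Int × PySem.Dict Nat Int) v =>
          if (m &&& (1 <<< v) != 0) && (pm.getD v 0 &&& (m ^^^ (1 <<< v)) == pm.getD v 0) then
            (st.1 + (pvFB pm n fuel (m ^^^ (1 <<< v)) st.2).1,
              (pvFB pm n fuel (m ^^^ (1 <<< v)) st.2).2)
          else st) (0, memo) with hF
      have heqv : (pvFB pm n (fuel + 1) m memo).1 = F.1 := by rw [pvFB, hg, hF]
      have heqm : (pvFB pm n (fuel + 1) m memo).2 = F.2.insert m F.1 := by rw [pvFB, hg, hF]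
      obtain ⟨h1, h2⟩ := pvFB_loop pm n fuel m (by omega)
        (fun m' memo' hlt hInv' => ih m' memo' hlt hInv') (List.range n) 0 memo hInv
      rw [← hF] at h1 h2
      have hval : F.1 = gval pm n m := by
        rw [h1, zero_add, pvl_sum_range]
        exact (pv_gval_rec pm n m (by omega)).symm
      rw [heqv, heqm]
      refine ⟨hval, ?_, ?_⟩
      · obtain ⟨c, hc⟩ := h2.1
        exact ⟨c, by rw [PySem.Dict.get?_insert_of_ne _ _ (Ne.symm hm0)]; exact hc⟩
      · intro k c hk
        rw [PySem.Dict.get?_insert] at hk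
        by_cases hkm : k = m
        · rw [if_pos hkm] at hk
          injection hk with hk'
          rw [← hk', hkm]
          exact hval
        · rw [if_neg hkm] at hk
          exact h2.2 k c hk

theorem pv_eq_all (edges : List (Int × Int)) :
    count_top_sort edges = count_top_sort_alt edges := by
  have hn1 : 1 ≤ 2 ^ (edges.length + 1) := Nat.one_le_two_pow
  have hInv0 : pvInv (pmOf (edges.length + 1) edges) (edges.length + 1)
      (PySem.Dict.empty.insert 0 1) := by
    constructor
    · exact ⟨1, PySem.Dict.get?_insert_self _ _ _⟩
    · intro k c hk
      rw [PySem.Dict.get?_insert] at hk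
      by_cases hk0 : k = 0
      · rw [if_pos hk0] at hk
        cases hk
        rw [hk0, pv_gval_zero]
      · rw [if_neg hk0, PySem.Dict.get?_empty] at hk
        cases hk
  have hB := (pvFB_spec (pmOf (edges.length + 1) edges) (edges.length + 1)
    (1 <<< (edges.length + 1)) ((1 <<< (edges.length + 1)) - 1)
    (PySem.Dict.empty.insert 0 1) (by rw [pvb_one_shift]; omega) hInv0).1
  show count_top_sort edges
    = (pvFB (pmOf (edges.length + 1) edges) (edges.length + 1) (1 <<< (edges.length + 1))
        ((1 <<< (edges.length + 1)) - 1) (PySem.Dict.empty.insert 0 1)).1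
  rw [hB, pv_A_eq_gval, pvb_one_shift]

-- ===== VERDICT (by name: the statement is the Claim_ definition above) =====
theorem count_top_sort_spec : Claim_equal_count_top_sort := by
  intro edges _ _
  unfold Spec_count_top_sort
  exact pv_eq_all edges
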